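-- pv_equiv track=rewrite | github.com/aneesh6214/nyx-soso-predicting-emergence | scripts/extract_activations.py | generate_text_samples
-- ===== SOURCE A (Python) =====
-- from typing import Dict, List, Optional
--
-- def generate_text_samples(num_tokens: int, batch_size: int = 1000) -> List[str]:
--     """Generate diverse text samples for activation extraction."""
--     # Use a mix of text sources for diverse activations
--     samples = []
--
--     # Common English text patterns
--     base_texts = [
--         "The quick brown fox jumps over the lazy dog. ",
--         "Machine learning is a subset of artificial intelligence. ",
--         "The weather today is sunny with a chance of rain. ",
--         "Mathematics is the language of the universe. ",
--         "Technology continues to evolve at a rapid pace. ",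
--         "Research shows that neural networks can learn complex patterns. ",
--         "The human brain contains billions of neurons. ",
--         "Data science combines statistics, programming, and domain knowledge. ",
--     ]
--
--     # Generate enough text to reach target token count
--     current_tokens = 0
--     while current_tokens < num_tokens:
--         for base_text in base_texts:
--             if current_tokens >= num_tokens:
--                 break
--             samples.append(base_text)
--             current_tokens += len(base_text.split())
--
--     return samples[:num_tokens]
-- ===== SOURCE B (Python) =====
-- from typing import Dict, List, Optional
--
-- def generate_text_samples(num_tokens: int, batch_size: int = 1000) -> List[str]:
--     """Generate diverse text samples for activation extraction (closed-form cycles + short remainder loop)."""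
--     base_texts = [
--         "The quick brown fox jumps over the lazy dog. ",
--         "Machine learning is a subset of artificial intelligence. ",
--         "The weather today is sunny with a chance of rain. ",
--         "Mathematics is the language of the universe. ",
--         "Technology continues to evolve at a rapid pace. ",
--         "Research shows that neural networks can learn complex patterns. ",
--         "The human brain contains billions of neurons. ",
--         "Data science combines statistics, programming, and domain knowledge. ",
--     ]
--     if num_tokens <= 0:
--         return []
--     counts = [len(t.split()) for t in base_texts]
--     cycle_sum = sum(counts)
--     full = num_tokens // cycle_sum
--     samples = base_texts * full
--     tokens = full * cycle_sum
--     for text, count in zip(base_texts, counts):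
--         if tokens >= num_tokens:
--             break
--         samples.append(text)
--         tokens += count
--     return samples
-- ===== Notes on version B (the rewrite author's own statement) =====
-- stated objective: faster
-- what changed: Instead of a while-loop that appends text-by-text and re-splits each text on every append, B precomputes the 8 per-text word counts once, emits full = num_tokens // 66 whole cycles by list multiplication, and finishes with one short remainder loop over the base texts.
import Mathlib
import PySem

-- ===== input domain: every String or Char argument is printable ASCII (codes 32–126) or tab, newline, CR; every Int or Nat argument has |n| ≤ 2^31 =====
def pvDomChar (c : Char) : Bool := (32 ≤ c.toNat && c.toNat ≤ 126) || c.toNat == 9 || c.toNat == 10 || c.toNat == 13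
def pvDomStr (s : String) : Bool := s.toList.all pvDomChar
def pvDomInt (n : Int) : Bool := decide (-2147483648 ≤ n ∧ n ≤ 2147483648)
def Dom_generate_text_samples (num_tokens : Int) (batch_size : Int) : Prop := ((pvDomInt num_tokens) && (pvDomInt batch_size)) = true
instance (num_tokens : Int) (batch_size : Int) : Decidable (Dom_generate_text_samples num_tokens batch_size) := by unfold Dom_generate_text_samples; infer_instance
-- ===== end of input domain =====

-- B replaces A's repeated whole-cycle while-loop (which re-splits a text on every append)
-- by a closed-form number of full cycles (list multiplication) plus one short remainder loop
-- over precomputed per-text token counts; same return value, large constant-factor speedup.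

-- the base_texts literal shared by both Pythons
def pvBaseTexts : List String := [
  "The quick brown fox jumps over the lazy dog. ",
  "Machine learning is a subset of artificial intelligence. ",
  "The weather today is sunny with a chance of rain. ",
  "Mathematics is the language of the universe. ",
  "Technology continues to evolve at a rapid pace. ",
  "Research shows that neural networks can learn complex patterns. ",
  "The human brain contains billions of neurons. ",
  "Data science combines statistics, programming, and domain knowledge. "]

-- len(t.split())  as an Int
def pvWcI (t : String) : Int := ((PySem.Str.split₀ t).length : Int)

-- ===== PORT A =====
-- the inner 'for base_text in base_texts: if current_tokens >= num_tokens: break; append; add'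
def pvCycleA (num : Int) : List String → Int → List String → Int × List String
  | [], cur, samp => (cur, samp)
  | t :: ts, cur, samp =>
    if cur ≥ num then (cur, samp)
    else pvCycleA num ts (cur + pvWcI t) (samp ++ [t])

theorem pvCycleA_fst_le (num : Int) : ∀ (ts : List String) (cur : Int) (samp : List String),
    cur ≤ (pvCycleA num ts cur samp).1 := by
  intro ts
  induction ts with
  | nil => intro cur samp; simp [pvCycleA]
  | cons t ts ih =>
    intro cur samp
    simp only [pvCycleA]
    split
    · exact le_refl _
    · have h1 : (0:Int) ≤ pvWcI t := by simp [pvWcI]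
      have := ih (cur + pvWcI t) (samp ++ [t])
      omega

theorem pvCycleA_cons (num cur : Int) (samp : List String) (t : String) (ts : List String) :
    pvCycleA num (t :: ts) cur samp =
      if cur ≥ num then (cur, samp) else pvCycleA num ts (cur + pvWcI t) (samp ++ [t]) := rfl

theorem pvCycleA_fst_gt (num cur : Int) (samp : List String) (h : cur < num) :
    cur < (pvCycleA num pvBaseTexts cur samp).1 := by
  have hw : pvWcI "The quick brown fox jumps over the lazy dog. " = 9 := by decide
  rw [show pvBaseTexts = "The quick brown fox jumps over the lazy dog. " ::
    ["Machine learning is a subset of artificial intelligence. ",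
     "The weather today is sunny with a chance of rain. ",
     "Mathematics is the language of the universe. ",
     "Technology continues to evolve at a rapid pace. ",
     "Research shows that neural networks can learn complex patterns. ",
     "The human brain contains billions of neurons. ",
     "Data science combines statistics, programming, and domain knowledge. "] from rfl]
  rw [pvCycleA_cons, if_neg (by omega)]
  have := pvCycleA_fst_le num
    ["Machine learning is a subset of artificial intelligence. ",
     "The weather today is sunny with a chance of rain. ",
     "Mathematics is the language of the universe. ",
     "Technology continues to evolve at a rapid pace. ",
     "Research shows that neural networks can learn complex patterns. ",
     "The human brain contains billions of neurons. ",
     "Data science combines statistics, programming, and domain knowledge. "]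
    (cur + pvWcI "The quick brown fox jumps over the lazy dog. ") (samp ++ ["The quick brown fox jumps over the lazy dog. "])
  omega

-- the outer 'while current_tokens < num_tokens'
def pvLoopA (num cur : Int) (samp : List String) : List String :=
  if h : cur < num then
    pvLoopA num (pvCycleA num pvBaseTexts cur samp).1 (pvCycleA num pvBaseTexts cur samp).2
  else samp
termination_by (num - cur).toNat
decreasing_by
  have := pvCycleA_fst_gt num cur samp h
  omega

def generate_text_samples (num_tokens : Int) (batch_size : Int) : List String :=
  PySem.List.slice (pvLoopA num_tokens 0 []) none (some num_tokens)

-- ===== PORT B =====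
-- 'for text, count in zip(base_texts, counts): if tokens >= num_tokens: break; append; add'
def pvRemB (num : Int) : List (String × Int) → Int → List String → List String
  | [], _, samp => samp
  | (t, c) :: rest, tok, samp =>
    if tok ≥ num then samp
    else pvRemB num rest (tok + c) (samp ++ [t])

def generate_text_samples_alt (num_tokens : Int) (batch_size : Int) : List String :=
  if num_tokens ≤ 0 then []
  else
    let counts := pvBaseTexts.map pvWcI
    let cycle_sum := counts.sum
    let full := PySem.Int.floordiv num_tokens cycle_sum
    let samples := (List.replicate full.toNat pvBaseTexts).flatten  -- base_texts * full
    let tokens := full * cycle_sum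
    pvRemB num_tokens (pvBaseTexts.zip counts) tokens samples

-- ===== PRECONDITION & SPEC =====
def Spec_generate_text_samples (num_tokens : Int) (batch_size : Int) (out : List String) : Prop := out = generate_text_samples_alt num_tokens batch_size
instance (num_tokens : Int) (batch_size : Int) (out : List String) : Decidable (Spec_generate_text_samples num_tokens batch_size out) := by unfold Spec_generate_text_samples; infer_instance

-- ===== CLAIM (what is proved, stated in full; the proofs are below) =====
def Claim_equal_generate_text_samples : Prop := ∀ (num_tokens : Int) (batch_size : Int), Dom_generate_text_samples num_tokens batch_size → Spec_generate_text_samples num_tokens batch_size (generate_text_samples num_tokens batch_size)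

-- ===== LEMMAS AND PROOFS =====

-- tokens added / texts appended by one (possibly partial) cycle that still needs d tokens
def pvDelta : List String → Int → Int
  | [], _ => 0
  | t :: ts, d => if d ≤ 0 then 0 else pvWcI t + pvDelta ts (d - pvWcI t)

def pvTake : List String → Int → List String
  | [], _ => []
  | t :: ts, d => if d ≤ 0 then [] else t :: pvTake ts (d - pvWcI t)

theorem pvCycleA_eq (num : Int) : ∀ (ts : List String) (cur : Int) (samp : List String),
    pvCycleA num ts cur samp = (cur + pvDelta ts (num - cur), samp ++ pvTake ts (num - cur)) := by
  intro ts
  induction ts with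
  | nil => intro cur samp; simp [pvCycleA, pvDelta, pvTake]
  | cons t ts ih =>
    intro cur samp
    by_cases h : cur ≥ num
    · simp [pvCycleA, pvDelta, pvTake, h, show num - cur ≤ 0 by omega]
    · simp only [pvCycleA, pvDelta, pvTake, if_neg h, if_neg (show ¬ num - cur ≤ 0 by omega)]
      rw [ih, show num - (cur + pvWcI t) = num - cur - pvWcI t from by ring]
      simp only [Prod.mk.injEq]
      exact ⟨by ring, by simp⟩

theorem pvRemB_eq (num : Int) : ∀ (ts : List String) (tok : Int) (samp : List String),
    pvRemB num (ts.map (fun t => (t, pvWcI t))) tok samp = samp ++ pvTake ts (num - tok) := by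
  intro ts
  induction ts with
  | nil => intro tok samp; simp [pvRemB, pvTake]
  | cons t ts ih =>
    intro tok samp
    by_cases h : tok ≥ num
    · simp [pvRemB, pvTake, h, show num - tok ≤ 0 by omega]
    · simp only [List.map_cons, pvRemB, pvTake, if_neg h, if_neg (show ¬ num - tok ≤ 0 by omega)]
      rw [ih]
      simp only [List.append_assoc, List.singleton_append]
      congr 2
      ring_nf

theorem pvWcI_vals :
    pvWcI "The quick brown fox jumps over the lazy dog. " = 9 ∧
    pvWcI "Machine learning is a subset of artificial intelligence. " = 8 ∧
    pvWcI "The weather today is sunny with a chance of rain. " = 10 ∧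
    pvWcI "Mathematics is the language of the universe. " = 7 ∧
    pvWcI "Technology continues to evolve at a rapid pace. " = 8 ∧
    pvWcI "Research shows that neural networks can learn complex patterns. " = 9 ∧
    pvWcI "The human brain contains billions of neurons. " = 7 ∧
    pvWcI "Data science combines statistics, programming, and domain knowledge. " = 8 := by
  decide

theorem pvSum_counts : (pvBaseTexts.map pvWcI).sum = 66 := by decide

theorem pvDelta_ge : ∀ (ts : List String) (d : Int), d ≤ (ts.map pvWcI).sum → d ≤ pvDelta ts d := by
  intro ts
  induction ts with
  | nil => intro d h; simpa [pvDelta] using h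
  | cons t ts ih =>
    intro d h
    simp only [pvDelta]
    split
    · omega
    · have := ih (d - pvWcI t) (by simp at h ⊢; omega)
      omega

theorem pvDelta_full (d : Int) (h : 66 ≤ d) : pvDelta pvBaseTexts d = 66 := by
  obtain ⟨h1, h2, h3, h4, h5, h6, h7, h8⟩ := pvWcI_vals
  simp only [pvBaseTexts, pvDelta, h1, h2, h3, h4, h5, h6, h7, h8]
  split_ifs <;> omega

theorem pvTake_full (d : Int) (h : 66 ≤ d) : pvTake pvBaseTexts d = pvBaseTexts := by
  obtain ⟨h1, h2, h3, h4, h5, h6, h7, h8⟩ := pvWcI_vals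
  simp only [pvBaseTexts, pvTake, h1, h2, h3, h4, h5, h6, h7]
  split_ifs <;> first | rfl | omega

theorem pvTake_nonpos {ts : List String} {d : Int} (h : d ≤ 0) : pvTake ts d = [] := by
  cases ts <;> simp [pvTake, h]

theorem pvTake_len_le (d : Int) :
    ((pvTake pvBaseTexts d).length : Int) ≤ max d 0 ∧ (pvTake pvBaseTexts d).length ≤ 8 := by
  obtain ⟨h1, h2, h3, h4, h5, h6, h7, h8⟩ := pvWcI_vals
  simp only [pvBaseTexts, pvTake, h1, h2, h3, h4, h5, h6, h7]
  split_ifs <;> simp <;> omega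

theorem pvLoopA_char : ∀ (q : Nat) (num cur r : Int) (samp : List String),
    0 ≤ r → r < 66 → num - cur = 66 * q + r →
    pvLoopA num cur samp = samp ++ (List.replicate q pvBaseTexts).flatten ++ pvTake pvBaseTexts r := by
  intro q
  induction q with
  | zero =>
    intro num cur r samp hr0 hr66 heq
    by_cases hc : cur < num
    · rw [pvLoopA, dif_pos hc, pvCycleA_eq]
      have hge : num - cur ≤ pvDelta pvBaseTexts (num - cur) := by
        apply pvDelta_ge; rw [pvSum_counts]; omega
      rw [pvLoopA, dif_neg (by omega)]
      simp only [List.replicate_zero, List.flatten_nil, List.append_nil]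
      congr 1
      congr 1
      omega
    · rw [pvLoopA, dif_neg hc]
      have : r = 0 := by omega
      simp [this, pvTake_nonpos (le_refl (0:Int))]
  | succ q ih =>
    intro num cur r samp hr0 hr66 heq
    have hc : cur < num := by omega
    rw [pvLoopA, dif_pos hc, pvCycleA_eq]
    rw [pvDelta_full _ (by omega), pvTake_full _ (by omega)]
    rw [ih num (cur + 66) r (samp ++ pvBaseTexts) hr0 hr66 (by push_cast at heq; omega)]
    simp [List.replicate_succ, List.append_assoc]

theorem pvZip_counts :
    pvBaseTexts.zip (pvBaseTexts.map pvWcI) = pvBaseTexts.map (fun t => (t, pvWcI t)) := by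
  decide

-- ===== VERDICT (by name: the statement is the Claim_ definition above) =====
theorem generate_text_samples_spec : Claim_equal_generate_text_samples := by
  intro num bs _
  unfold Spec_generate_text_samples generate_text_samples generate_text_samples_alt
  by_cases hn : num ≤ 0
  · rw [pvLoopA, dif_neg (by omega)]
    simp [hn, PySem.List.slice]
  · rw [if_neg hn]
    simp only [pvSum_counts, pvZip_counts]
    have h0 : 0 < num := by omega
    set q : Nat := (num / 66).toNat with hq
    set r : Int := num % 66 with hr
    have hfd : PySem.Int.floordiv num 66 = num / 66 := PySem.Int.floordiv_eq_ediv_of_pos (by omega)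
    have hq' : (q : Int) = num / 66 := by omega
    have hr0 : 0 ≤ r := by omega
    have hr66 : r < 66 := by omega
    have hnum : num - 0 = 66 * q + r := by omega
    rw [pvLoopA_char q num 0 r [] hr0 hr66 hnum]
    rw [pvRemB_eq]
    rw [hfd]
    have htn : (num / 66).toNat = q := rfl
    have htok : num - num / 66 * 66 = r := by omega
    rw [htn, htok]
    -- the final samples[:num_tokens] slice of A is a no-op: the list is shorter than num
    have hlen : ((List.replicate q pvBaseTexts).flatten ++ pvTake pvBaseTexts r).length ≤ num.toNat := by
      have hl := pvTake_len_le r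
      have h8 : pvBaseTexts.length = 8 := by decide
      rw [List.length_append, List.length_flatten]
      simp only [List.map_replicate, h8, List.sum_replicate, smul_eq_mul]
      obtain ⟨hl1, hl2⟩ := hl
      have hl1' : ((pvTake pvBaseTexts r).length : Int) ≤ r := by omega
      omega
    have hcast : num = ((num.toNat : Nat) : Int) := by omega
    rw [List.nil_append, hcast, PySem.List.slice_to_natCast, List.take_of_length_le hlen]
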